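-- pv_equiv track=rewrite | github.com/mktran0417/CodeSignal | true_false_window.py | solution
-- ===== SOURCE A (Python) =====
-- def solution(a, window_size):
--     results = []
--     for i in range(0, len(a) - window_size + 1, 1):
--         switch = True
--         for j in range(window_size):
--             if a[i + j] % 2 == 0:
--                 switch = False
--                 break;
--         results.append(switch)
--     return results
-- ===== SOURCE B (Python) =====
-- def solution(a, window_size):
--     n = len(a)
--     if window_size <= 0:
--         # empty windows: vacuously all-odd
--         return [True] * (n - window_size + 1)
--     evens = [0]
--     for x in a:
--         evens.append(evens[-1] + (1 if x % 2 == 0 else 0))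
--     return [evens[i + window_size] == evens[i] for i in range(n - window_size + 1)]
-- ===== Notes on version B (the rewrite author's own statement) =====
-- stated objective: alternative
-- what changed: Replaces the per-window inner rescan (with early break) by a prefix count of even elements, deciding each window by one subtraction-free prefix comparison.
import Mathlib
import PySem

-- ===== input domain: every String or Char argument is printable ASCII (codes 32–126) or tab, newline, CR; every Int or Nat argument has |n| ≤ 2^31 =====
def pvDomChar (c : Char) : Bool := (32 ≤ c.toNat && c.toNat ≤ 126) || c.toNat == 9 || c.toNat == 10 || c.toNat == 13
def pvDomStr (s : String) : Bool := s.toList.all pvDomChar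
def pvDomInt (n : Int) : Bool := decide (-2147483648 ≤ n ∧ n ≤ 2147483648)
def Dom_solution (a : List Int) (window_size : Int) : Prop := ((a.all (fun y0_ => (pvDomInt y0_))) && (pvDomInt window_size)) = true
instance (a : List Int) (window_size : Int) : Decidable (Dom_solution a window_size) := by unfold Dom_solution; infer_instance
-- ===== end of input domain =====

-- B replaces A's per-window inner rescan by a prefix count of even elements, comparing prefix counts per window; objective: alternative algorithm.

-- ===== PORT A =====
-- inner 'for j in range(window_size)' loop with its early break
def windowA (a : List Int) (i : Int) (js : List Int) : Bool :=
  match js with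
  | [] => true
  | j :: rest =>
      if PySem.Int.mod (PySem.List.pyGetD a (i + j) 0) 2 = 0 then false
      else windowA a i rest

def solution (a : List Int) (window_size : Int) : List Bool :=
  (PySem.List.pyRange 0 ((a.length : Int) - window_size + 1) 1).foldl
    (fun results i => results ++ [windowA a i (PySem.List.pyRange 0 window_size 1)]) []

-- ===== PORT B =====
-- one step of B's 'for x in a' loop: evens.append(evens[-1] + (1 if x % 2 == 0 else 0))
def evStep (ev : List Int) (x : Int) : List Int :=
  ev ++ [PySem.List.pyGetD ev (-1) 0 + (if PySem.Int.mod x 2 = 0 then 1 else 0)]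

def solution_alt (a : List Int) (window_size : Int) : List Bool :=
  let n : Int := a.length
  if window_size ≤ 0 then
    List.replicate (n - window_size + 1).toNat true
  else
    let evens := a.foldl evStep [0]
    (PySem.List.pyRange 0 (n - window_size + 1) 1).map
      (fun i => PySem.List.pyGetD evens (i + window_size) 0 == PySem.List.pyGetD evens i 0)

-- ===== PRECONDITION & SPEC =====
def Spec_solution (a : List Int) (window_size : Int) (out : List Bool) : Prop := out = solution_alt a window_size
instance (a : List Int) (window_size : Int) (out : List Bool) : Decidable (Spec_solution a window_size out) := by unfold Spec_solution; infer_instance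

-- ===== CLAIM (what is proved, stated in full; the proofs are below) =====
def Claim_equal_solution : Prop := ∀ (a : List Int) (window_size : Int), Dom_solution a window_size → Spec_solution a window_size (solution a window_size)

-- ===== LEMMAS AND PROOFS =====

-- predicate "is even" as A and B test it
def evP (x : Int) : Bool := PySem.Int.mod x 2 = 0

-- A's inner loop over range(j, w) checks the segment a[i+j : i+w] for evens
lemma windowA_eq (a : List Int) (i w : Int) (hi : 0 ≤ i) (hw : i + w ≤ (a.length : Int)) :
    ∀ (n : Nat) (j : Int), 0 ≤ j → (w - j).toNat = n →
      windowA a i (PySem.List.pyRange j w 1)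
        = ((a.drop (i + j).toNat).take (w - j).toNat).all (fun x => !evP x) := by
  intro n
  induction n with
  | zero =>
      intro j hj hn
      rw [PySem.List.pyRange_one_eq_nil (by omega)]
      simp [windowA, hn]
  | succ n ih =>
      intro j hj hn
      have hjw : j < w := by omega
      have hlt : (i + j).toNat < a.length := by omega
      rw [PySem.List.pyRange_one_cons hjw]
      have hdrop : a.drop (i + j).toNat = a[(i + j).toNat] :: a.drop ((i + j).toNat + 1) :=
        (List.getElem_cons_drop hlt).symm
      have htake : (w - j).toNat = (w - (j + 1)).toNat + 1 := by omega
      rw [hdrop, htake, List.take_succ_cons, List.all_cons]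
      have hget : PySem.List.pyGetD a (i + j) 0 = a[(i + j).toNat] :=
        PySem.List.pyGetD_eq_getElem a 0 (by omega) (by omega)
      have hnext : (i + (j + 1)).toNat = (i + j).toNat + 1 := by omega
      simp only [windowA, hget]
      by_cases h : PySem.Int.mod a[(i + j).toNat] 2 = 0
      · have hd : (2 : Int) ∣ a[(i + j).toNat] := (PySem.Int.mod_eq_zero_iff_dvd _ _).mp h
        rw [if_pos h]
        simp [evP, hd]
      · have hnd : ¬ (2 : Int) ∣ a[(i + j).toNat] :=
          fun hd => h ((PySem.Int.mod_eq_zero_iff_dvd _ _).mpr hd)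
        rw [if_neg h, ih (j + 1) (by omega) (by omega), hnext]
        simp [evP, hnd]

-- B's prefix list is the list of even-counts of the prefixes of a
lemma evens_spec (a : List Int) :
    a.foldl evStep [0] = (List.range (a.length + 1)).map (fun k => (((a.take k).countP evP : Nat) : Int)) := by
  induction a using List.reverseRecOn with
  | nil => simp [List.range_succ]
  | append_singleton l x ih =>
      rw [List.foldl_append, List.foldl_cons, List.foldl_nil, ih, evStep]
      have hlast : PySem.List.pyGetD
          ((List.range (l.length + 1)).map (fun k => (((l.take k).countP evP : Nat) : Int))) (-1) 0
          = ((l.countP evP : Nat) : Int) := by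
        rw [List.range_succ, List.map_append, List.map_cons, List.map_nil,
          PySem.List.pyGetD_neg_one_append_singleton, List.take_length]
      have hlen : (l ++ [x]).length + 1 = l.length + 1 + 1 := by simp
      have hR : List.range (l.length + 1 + 1) = List.range (l.length + 1) ++ [l.length + 1] :=
        List.range_succ
      rw [hlast, hlen, hR, List.map_append, List.map_cons, List.map_nil]
      congr 1
      · exact List.map_congr_left (fun k hk => by
          have hk' : k ≤ l.length := by have := List.mem_range.mp hk; omega
          rw [List.take_append_of_le_length hk'])
      · have h1 : (l ++ [x]).take (l.length + 1) = l ++ [x] :=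
          List.take_of_length_le (by simp)
        rw [h1, List.countP_append]
        simp [evP]

-- indexing B's prefix list
lemma evens_get (a : List Int) (t : Int) (h0 : 0 ≤ t) (h1 : t ≤ (a.length : Int)) :
    PySem.List.pyGetD
      ((List.range (a.length + 1)).map (fun k => (((a.take k).countP evP : Nat) : Int))) t 0
      = (((a.take t.toNat).countP evP : Nat) : Int) := by
  rw [PySem.List.pyGetD_eq_getElem _ 0 h0 (by simp; omega)]
  simp

-- per-index agreement of the two window tests
lemma window_agree (a : List Int) (w i : Int) (hw : 0 < w) (hi : 0 ≤ i)
    (hiw : i + w ≤ (a.length : Int)) :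
    windowA a i (PySem.List.pyRange 0 w 1)
      = ((((a.take (i + w).toNat).countP evP : Nat) : Int) == (((a.take i.toNat).countP evP : Nat) : Int)) := by
  rw [windowA_eq a i w hi hiw (w - 0).toNat 0 le_rfl rfl]
  have hsum : (i + w).toNat = i.toNat + (w - 0).toNat := by omega
  have htake : a.take (i.toNat + (w - 0).toNat)
      = a.take i.toNat ++ (a.drop i.toNat).take (w - 0).toNat := by
    rw [List.take_add]
  have hseg : a.drop (i + 0).toNat = a.drop i.toNat := by norm_num
  rw [hsum, htake, List.countP_append, hseg]
  rcases h : ((a.drop i.toNat).take (w - 0).toNat).all (fun x => !evP x) with _ | _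
  · -- some element even: count of segment positive, sums differ
    have hex : ∃ x ∈ (a.drop i.toNat).take (w - 0).toNat, evP x = true := by
      simpa [List.all_eq_true] using h
    have hpos : 0 < ((a.drop i.toNat).take (w - 0).toNat).countP evP :=
      List.countP_pos_iff.mpr hex
    symm; simp only [beq_eq_false_iff_ne, ne_eq]
    intro hEq
    have : ((a.drop i.toNat).take (w - 0).toNat).countP evP = 0 := by
      push_cast at hEq; omega
    omega
  · -- all odd: segment count zero
    have hz : ((a.drop i.toNat).take (w - 0).toNat).countP evP = 0 :=
      List.countP_eq_zero.mpr (by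
        intro x hx
        have := (List.all_eq_true.mp h) x hx
        simpa using this)
    rw [hz]
    simp

-- A's outer append-fold is a map over the outer range
lemma solution_eq_map (a : List Int) (w : Int) :
    solution a w = (PySem.List.pyRange 0 ((a.length : Int) - w + 1) 1).map
      (fun i => windowA a i (PySem.List.pyRange 0 w 1)) := by
  unfold solution
  rw [PySem.List.foldl_append_singleton_eq_map]
  simp

-- ===== VERDICT (by name: the statement is the Claim_ definition above) =====
theorem solution_spec : Claim_equal_solution := by
  intro a w _
  unfold Spec_solution
  rw [solution_eq_map]
  by_cases hw : w ≤ 0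
  · simp only [solution_alt, if_pos hw]
    have hnil : PySem.List.pyRange 0 w 1 = [] := PySem.List.pyRange_one_eq_nil (by omega)
    calc (PySem.List.pyRange 0 ((a.length : Int) - w + 1) 1).map
            (fun i => windowA a i (PySem.List.pyRange 0 w 1))
        = (PySem.List.pyRange 0 ((a.length : Int) - w + 1) 1).map (fun _ => true) := by
          exact List.map_congr_left (fun i _ => by rw [hnil]; rfl)
      _ = List.replicate ((a.length : Int) - w + 1).toNat true := by
          rw [List.map_const', PySem.List.length_pyRange_one]
          norm_num
  · simp only [solution_alt, if_neg hw, evens_spec]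
    apply List.map_congr_left
    intro i hi
    have hmem := PySem.List.mem_pyRange_one.mp hi
    have hi0 : 0 ≤ i := hmem.1
    have hiw : i + w ≤ (a.length : Int) := by omega
    rw [evens_get a (i + w) (by omega) hiw, evens_get a i hi0 (by omega)]
    exact window_agree a w i (by omega) hi0 hiw
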